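-- pv_equiv track=rewrite | github.com/tushar5353/del_gmail_mails | del_gmail_mails.py | _processed_status
-- ===== SOURCE A (Python) =====
-- def _processed_status(all_ids, message_id, label):
--     """
--     Returns the message status if it is processed or not
--
--     :param all_ids: - list of all message ids which are processed
--     :param message_id: - message id to check against all_ids
--     :param page_id: - single label
--     """
--     label_present = True if label in all_ids.keys() else False
--     if label_present and message_id in all_ids[label]:
--         return "same_label"
--     for key, value in all_ids.items():
--         if message_id in value:
--             return "different_label"
--     return "not_processed"
-- ===== SOURCE B (Python) =====
-- def _processed_status(all_ids, message_id, label):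
--     found_elsewhere = False
--     for key, value in all_ids.items():
--         if message_id in value:
--             if key == label:
--                 return "same_label"
--             found_elsewhere = True
--     return "different_label" if found_elsewhere else "not_processed"
-- ===== Notes on version B (the rewrite author's own statement) =====
-- stated objective: simpler
-- what changed: Replaced A's guarded dict lookup for same_label plus a separate full scan by one single pass over all items maintaining a found_elsewhere flag, deciding same_label at the label's own entry.
import Mathlib
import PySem

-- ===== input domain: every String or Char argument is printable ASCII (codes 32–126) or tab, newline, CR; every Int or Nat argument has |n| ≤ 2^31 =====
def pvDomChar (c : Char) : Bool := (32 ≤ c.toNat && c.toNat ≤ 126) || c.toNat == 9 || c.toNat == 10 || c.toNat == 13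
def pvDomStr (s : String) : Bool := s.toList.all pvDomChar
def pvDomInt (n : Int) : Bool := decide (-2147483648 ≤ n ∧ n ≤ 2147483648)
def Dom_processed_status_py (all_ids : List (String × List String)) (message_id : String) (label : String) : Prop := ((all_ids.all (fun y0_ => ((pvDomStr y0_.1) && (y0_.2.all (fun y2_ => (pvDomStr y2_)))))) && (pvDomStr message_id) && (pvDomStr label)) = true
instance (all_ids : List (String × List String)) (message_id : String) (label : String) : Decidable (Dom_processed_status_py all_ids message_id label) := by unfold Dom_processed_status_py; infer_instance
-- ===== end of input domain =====

-- B replaces A's guarded same_label lookup plus separate scan by one single pass with a found-elsewhere flag (simpler decomposition, same cost).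


-- ===== PORT A =====
-- the 'for key, value in all_ids.items()' loop of A
def pvA_scan (all_ids : List (String × List String)) (message_id : String) : String :=
  match all_ids with
  | [] => "not_processed"
  | (_, value) :: rest =>
      if value.contains message_id then "different_label" else pvA_scan rest message_id

def processed_status_py (all_ids : List (String × List String)) (message_id : String) (label : String) : String :=
  let label_present := if (all_ids.map Prod.fst).contains label then true else false
  if label_present && ((all_ids.lookup label).getD []).contains message_id then "same_label"
  else pvA_scan all_ids message_id

-- ===== PORT B =====
-- B's single loop, carrying the found_elsewhere flag
def pvB_scan (all_ids : List (String × List String)) (message_id : String) (label : String)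
    (found_elsewhere : Bool) : String :=
  match all_ids with
  | [] => if found_elsewhere then "different_label" else "not_processed"
  | (key, value) :: rest =>
      if value.contains message_id then
        if key == label then "same_label" else pvB_scan rest message_id label true
      else pvB_scan rest message_id label found_elsewhere

def processed_status_py_alt (all_ids : List (String × List String)) (message_id : String) (label : String) : String :=
  pvB_scan all_ids message_id label false

-- ===== PRECONDITION & SPEC =====
-- Pre_ requires pairwise-distinct keys: all_ids encodes a Python dict, which cannot
-- contain duplicate keys, so no input A accepts is excluded; on duplicate-key lists
-- the association-list encoding is ambiguous and the two ports may differ.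
def Pre_processed_status_py (all_ids : List (String × List String)) (message_id : String) (label : String) : Prop :=
  (all_ids.map Prod.fst).Nodup
instance (all_ids : List (String × List String)) (message_id : String) (label : String) : Decidable (Pre_processed_status_py all_ids message_id label) := by unfold Pre_processed_status_py; infer_instance

def pvWitness_processed_status_py : (List (String × List String)) × String × String :=
  ([("inbox", ["m1", "m2"]), ("work", ["m3"])], "m3", "inbox")

def Spec_processed_status_py (all_ids : List (String × List String)) (message_id : String) (label : String) (out : String) : Prop := out = processed_status_py_alt all_ids message_id label
instance (all_ids : List (String × List String)) (message_id : String) (label : String) (out : String) : Decidable (Spec_processed_status_py all_ids message_id label out) := by unfold Spec_processed_status_py; infer_instance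

-- ===== CLAIM (what is proved, stated in full; the proofs are below) =====
def Claim_equal_processed_status_py : Prop := ∀ (all_ids : List (String × List String)) (message_id : String) (label : String), Dom_processed_status_py all_ids message_id label → Pre_processed_status_py all_ids message_id label → Spec_processed_status_py all_ids message_id label (processed_status_py all_ids message_id label)

-- ===== LEMMAS AND PROOFS =====

theorem pvWitness_ok :
    Dom_processed_status_py pvWitness_processed_status_py.1 pvWitness_processed_status_py.2.1 pvWitness_processed_status_py.2.2 ∧
    Pre_processed_status_py pvWitness_processed_status_py.1 pvWitness_processed_status_py.2.1 pvWitness_processed_status_py.2.2 := by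
  decide

-- A's scan when some value contains the id
theorem pvA_scan_pos (l : List (String × List String)) (mid : String)
    (h : l.any (fun p => p.2.contains mid) = true) : pvA_scan l mid = "different_label" := by
  induction l with
  | nil => simp at h
  | cons p rest ih =>
      obtain ⟨k, v⟩ := p
      by_cases hc : v.contains mid = true
      · have hm : mid ∈ v := by simpa [List.contains_eq_mem] using hc
        simp [pvA_scan, hm]
      · have hc' : v.contains mid = false := by simpa using hc
        have hm : mid ∉ v := by simpa [List.contains_eq_mem] using hc'
        simp only [List.any_cons, hc', Bool.false_or] at h
        simp [pvA_scan, hm, ih h]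

-- A's scan when no value contains the id
theorem pvA_scan_neg (l : List (String × List String)) (mid : String)
    (h : l.any (fun p => p.2.contains mid) = false) : pvA_scan l mid = "not_processed" := by
  induction l with
  | nil => rfl
  | cons p rest ih =>
      obtain ⟨k, v⟩ := p
      simp only [List.any_cons, Bool.or_eq_false_iff] at h
      have hm : mid ∉ v := by simpa [List.contains_eq_mem] using h.1
      simp [pvA_scan, hm, ih h.2]

-- if the first entry under `lab` contains `mid`, B's scan returns "same_label" for any flag
theorem pvB_scan_same (l : List (String × List String)) (mid lab : String) (v : List String)
    (hlk : l.lookup lab = some v) (hv : mid ∈ v) :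
    ∀ found, pvB_scan l mid lab found = "same_label" := by
  induction l with
  | nil => simp [List.lookup] at hlk
  | cons p rest ih =>
      obtain ⟨k, w⟩ := p
      intro found
      by_cases hk : lab = k
      · subst hk
        simp only [List.lookup, beq_self_eq_true] at hlk
        injection hlk with hwv
        subst hwv
        simp [pvB_scan, List.contains_eq_mem, hv]
      · have hb : (lab == k) = false := beq_eq_false_iff_ne.mpr hk
        have hlk' : rest.lookup lab = some v := by
          simpa [List.lookup, hb] using hlk
        have hk2 : ¬ k = lab := fun h => hk (Eq.symm h)
        by_cases hw : mid ∈ w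
        · simp [pvB_scan, List.contains_eq_mem, hw, beq_iff_eq, hk2, ih hlk']
        · simp [pvB_scan, List.contains_eq_mem, hw, ih hlk']

-- B's scan, id nowhere under `lab`, found somewhere (or flagged already)
theorem pvB_scan_other_pos (l : List (String × List String)) (mid lab : String)
    (h : ∀ p ∈ l, p.1 = lab → p.2.contains mid = false) :
    ∀ found, (found || l.any (fun p => p.2.contains mid)) = true →
      pvB_scan l mid lab found = "different_label" := by
  induction l with
  | nil =>
      intro found hf
      simp only [List.any_nil, Bool.or_false] at hf
      simp [pvB_scan, hf]
  | cons p rest ih =>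
      obtain ⟨k, v⟩ := p
      intro found hf
      have hrest : ∀ p ∈ rest, p.1 = lab → p.2.contains mid = false := by
        intro q hq; exact h q (List.mem_cons_of_mem _ hq)
      by_cases hc : v.contains mid = true
      · have hk : ¬ k = lab := by
          intro hk
          have := h (k, v) List.mem_cons_self hk
          rw [hc] at this
          exact absurd this (by simp)
        have hm : mid ∈ v := by simpa [List.contains_eq_mem] using hc
        simp [pvB_scan, hm, hk, ih hrest true rfl]
      · have hc' : v.contains mid = false := by simpa using hc
        have hm : mid ∉ v := by simpa [List.contains_eq_mem] using hc'
        simp only [List.any_cons, hc', Bool.false_or] at hf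
        simp [pvB_scan, hm, ih hrest found hf]

-- B's scan, id nowhere at all and no flag
theorem pvB_scan_other_neg (l : List (String × List String)) (mid lab : String) :
    ∀ found, (found || l.any (fun p => p.2.contains mid)) = false →
      pvB_scan l mid lab found = "not_processed" := by
  induction l with
  | nil =>
      intro found hf
      simp only [List.any_nil, Bool.or_false] at hf
      simp [pvB_scan, hf]
  | cons p rest ih =>
      obtain ⟨k, v⟩ := p
      intro found hf
      simp only [List.any_cons, Bool.or_eq_false_iff] at hf
      have hm : mid ∉ v := by simpa [List.contains_eq_mem] using hf.2.1
      have hrec := ih found (by rw [hf.1, Bool.false_or]; exact hf.2.2)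
      simp [pvB_scan, hm, hrec]

-- with distinct keys, every entry under `lab` carries the looked-up value
theorem pv_lookup_unique (l : List (String × List String)) (lab : String) (v : List String)
    (hnd : (l.map Prod.fst).Nodup) (hlk : l.lookup lab = some v) :
    ∀ p ∈ l, p.1 = lab → p.2 = v := by
  induction l with
  | nil => intro p hp; simp at hp
  | cons q rest ih =>
      obtain ⟨k, w⟩ := q
      simp only [List.map_cons, List.nodup_cons] at hnd
      intro p hp hpl
      rcases List.mem_cons.mp hp with h1 | h2
      · subst h1
        simp only at hpl
        subst hpl
        simp only [List.lookup, beq_self_eq_true] at hlk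
        injection hlk
      · by_cases hk : k = lab
        · exfalso
          apply hnd.1
          rw [hk, ← hpl]
          exact List.mem_map_of_mem h2
        · have hb : (lab == k) = false := beq_eq_false_iff_ne.mpr (fun h => hk (Eq.symm h))
          have hlk' : rest.lookup lab = some v := by
            simpa [List.lookup, hb] using hlk
          exact ih hnd.2 hlk' p h2 hpl

-- absent key: no entry carries `lab`
theorem pv_lookup_none (l : List (String × List String)) (lab mid : String)
    (hnk : (l.map Prod.fst).contains lab = false) :
    ∀ p ∈ l, p.1 = lab → p.2.contains mid = false := by
  intro p hp hpl
  exfalso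
  have : lab ∈ l.map Prod.fst := hpl ▸ List.mem_map_of_mem hp
  simp [List.contains_eq_mem, this] at hnk

-- present key: lookup succeeds
theorem pv_lookup_present (l : List (String × List String)) (lab : String)
    (h : lab ∈ l.map Prod.fst) : (l.lookup lab).isSome := by
  induction l with
  | nil => simp at h
  | cons q rest ih =>
      obtain ⟨k, w⟩ := q
      by_cases hk : lab = k
      · simp [List.lookup, hk]
      · simp only [List.map_cons, List.mem_cons] at h
        rcases h with h1 | h2
        · exact absurd h1 hk
        · have hb : (lab == k) = false := beq_eq_false_iff_ne.mpr hk
          simp [List.lookup, hb, ih h2]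

-- ===== VERDICT (by name: the statement is the Claim_ definition above) =====
theorem processed_status_py_spec : Claim_equal_processed_status_py := by
  intro all_ids message_id label _ hpre
  unfold Spec_processed_status_py processed_status_py_alt
  simp only [processed_status_py]
  by_cases hpres : (all_ids.map Prod.fst).contains label = true
  · rcases hv : all_ids.lookup label with _ | v
    · exfalso
      have := pv_lookup_present all_ids label (by simpa [List.contains_eq_mem] using hpres)
      simp [hv] at this
    · by_cases hmc : v.contains message_id = true
      · have hmv : message_id ∈ v := by simpa [List.contains_eq_mem] using hmc
        have hb := pvB_scan_same all_ids message_id label v hv hmv false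
        simp only [if_pos hpres, Option.getD_some, Bool.true_and, hmc]
        rw [if_pos trivial, hb]
      · have hmc' : v.contains message_id = false := by simpa using hmc
        have hnolab : ∀ p ∈ all_ids, p.1 = label → p.2.contains message_id = false := by
          intro p hp hpl
          rw [pv_lookup_unique all_ids label v hpre hv p hp hpl]
          exact hmc'
        simp only [if_pos hpres, Option.getD_some, Bool.true_and, hmc',
          Bool.false_eq_true, if_false]
        cases hany : all_ids.any (fun p => p.2.contains message_id) with
        | true =>
            rw [pvA_scan_pos all_ids message_id hany,
              pvB_scan_other_pos all_ids message_id label hnolab false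
                (by rw [Bool.false_or]; exact hany)]
        | false =>
            rw [pvA_scan_neg all_ids message_id hany,
              pvB_scan_other_neg all_ids message_id label false
                (by rw [Bool.false_or]; exact hany)]
  · have hpres' : (all_ids.map Prod.fst).contains label = false := by simpa using hpres
    have hnolab := pv_lookup_none all_ids label message_id hpres'
    simp only [hpres', Bool.false_eq_true, if_false, Bool.false_and]
    cases hany : all_ids.any (fun p => p.2.contains message_id) with
    | true =>
        rw [pvA_scan_pos all_ids message_id hany,
          pvB_scan_other_pos all_ids message_id label hnolab false
            (by rw [Bool.false_or]; exact hany)]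
    | false =>
        rw [pvA_scan_neg all_ids message_id hany,
          pvB_scan_other_neg all_ids message_id label false
            (by rw [Bool.false_or]; exact hany)]
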